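-- pv_equiv track=rewrite | github.com/supvolume/codewars_solution | 5kyu/slogan_maker.py | slogan_maker
-- ===== SOURCE A (Python) =====
-- import itertools
--
-- def slogan_maker(array):
--     # remove duplicate without reorder
--     new_array = []
--     for word in array:
--         if word not in new_array:
--             new_array.append(word)
--     # create slogan
--     slogans = []
--     slo_list = list(itertools.permutations(new_array))
--     for slogan in slo_list:
--         slogans.append(' '.join(slogan))
--     return slogans
-- ===== SOURCE B (Python) =====
-- def slogan_maker(array):
--     # dedup preserving first occurrences, with a set for O(1) membership
--     seen = set()
--     words = []
--     for w in array:
--         if w not in seen: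
--             seen.add(w)
--             words.append(w)
--
--     # build the joined slogans directly by recursive index-order selection
--     def build(rest):
--         if not rest:
--             return ['']
--         if len(rest) == 1:
--             return [rest[0]]
--         out = []
--         for i, w in enumerate(rest):
--             for tail in build(rest[:i] + rest[i + 1:]):
--                 out.append(w + ' ' + tail)
--         return out
--
--     return build(words)
-- ===== Notes on version B (the rewrite author's own statement) =====
-- stated objective: alternative
-- what changed: Dedup now uses a seen-set instead of scanning the output list, and the permutations + join pair is replaced by a recursive index-order generator that builds the joined slogan strings directly (no itertools, no tuple lists).
import Mathlib
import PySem

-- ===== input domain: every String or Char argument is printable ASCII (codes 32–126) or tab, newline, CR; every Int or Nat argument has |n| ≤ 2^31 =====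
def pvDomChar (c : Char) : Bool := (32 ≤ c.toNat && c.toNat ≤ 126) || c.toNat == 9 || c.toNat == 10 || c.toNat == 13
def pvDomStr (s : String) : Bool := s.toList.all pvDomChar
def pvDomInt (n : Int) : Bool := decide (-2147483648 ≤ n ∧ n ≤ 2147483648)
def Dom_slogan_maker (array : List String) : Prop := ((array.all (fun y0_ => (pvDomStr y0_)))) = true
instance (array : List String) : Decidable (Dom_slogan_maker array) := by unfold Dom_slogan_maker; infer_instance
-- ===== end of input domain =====

-- B replaces the list-scan dedup by a seen-set and replaces itertools.permutations + join
-- by one recursive generator building the joined strings directly (alternative, same cost).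

-- ===== PORT A =====
-- itertools.permutations(xs), ported by its documented recursive equivalence: for each index i
-- in ascending order, xs[i] prepended to each permutation of xs with index i removed.
-- fuel = xs.length is exact: each recursive step removes exactly one element.
def pvPermsA : Nat → List String → List (List String)
  | _, [] => [[]]
  | 0, _ :: _ => []
  | n+1, xs =>
      (List.range xs.length).flatMap (fun i =>
        (pvPermsA n (xs.eraseIdx i)).map (fun p => xs.getD i "" :: p))

def slogan_maker (array : List String) : List String :=
  -- remove duplicate without reorder
  let new_array := array.foldl (fun acc word => if word ∈ acc then acc else acc ++ [word]) []
  -- create slogan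
  let slo_list := pvPermsA new_array.length new_array
  slo_list.foldl (fun slogans slogan => slogans ++ [PySem.Str.join " " slogan]) []

-- ===== PORT B =====
-- w + ' ' + tail : Python str concatenation, ported exactly as code-point list concatenation.
def pvConcatSp (w t : String) : String := String.ofList (w.toList ++ ' ' :: t.toList)

-- build(rest): fuel = rest.length is exact, each recursive call drops one element.
def pvBuildB : Nat → List String → List String
  | _, [] => [""]
  | _, [w] => [w]
  | 0, _ => []
  | n+1, xs =>
      (PySem.List.enumerate xs).flatMap (fun iw =>
        (pvBuildB n (PySem.List.slice xs none (some iw.1) ++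
                     PySem.List.slice xs (some (iw.1 + 1)) none)).map
          (fun tail => pvConcatSp iw.2 tail))

def slogan_maker_alt (array : List String) : List String :=
  let st := array.foldl
    (fun st w => if PySem.Set.contains st.1 w then st else (PySem.Set.add st.1 w, st.2 ++ [w]))
    ((PySem.Set.empty : PySem.Set String), ([] : List String))
  pvBuildB st.2.length st.2

-- ===== PRECONDITION & SPEC =====
def Spec_slogan_maker (array : List String) (out : List String) : Prop := out = slogan_maker_alt array
instance (array : List String) (out : List String) : Decidable (Spec_slogan_maker array out) := by unfold Spec_slogan_maker; infer_instance

-- ===== CLAIM (what is proved, stated in full; the proofs are below) =====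
def Claim_equal_slogan_maker : Prop := ∀ (array : List String), Dom_slogan_maker array → Spec_slogan_maker array (slogan_maker array)

-- ===== LEMMAS AND PROOFS =====

-- A's append-loop over the permutations is a map.
theorem pv_foldl_join (l : List (List String)) (acc : List String) :
    l.foldl (fun slogans slogan => slogans ++ [PySem.Str.join " " slogan]) acc
      = acc ++ l.map (PySem.Str.join " ") := by
  induction l generalizing acc with
  | nil => simp
  | cons p rest ih => simp [List.foldl, ih]

-- the two dedup loops produce the same word list
theorem pv_dedup_eq (arr : List String) (seen : PySem.Set String) (out : List String)
    (hinv : ∀ w, PySem.Set.contains seen w = decide (w ∈ out)) :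
    (arr.foldl
      (fun st w => if PySem.Set.contains st.1 w then st else (PySem.Set.add st.1 w, st.2 ++ [w]))
      (seen, out)).2
    = arr.foldl (fun acc word => if word ∈ acc then acc else acc ++ [word]) out := by
  induction arr generalizing seen out with
  | nil => rfl
  | cons a rest ih =>
    simp only [List.foldl]
    by_cases ha : a ∈ out
    · have hc : PySem.Set.contains seen a = true := by rw [hinv]; simpa
      rw [if_pos hc, if_pos ha]
      exact ih seen out hinv
    · have han : a ∉ seen := by
        have h := hinv a
        rw [decide_eq_false ha] at h
        simpa [PySem.Set.contains] using h
      rw [if_neg (by simpa [PySem.Set.contains] using han), if_neg ha]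
      refine ih _ _ ?_
      intro w
      have hiff : w ∈ seen ↔ w ∈ out := by
        have h := hinv w
        simpa [PySem.Set.contains] using h
      rw [show PySem.Set.add seen a = seen ++ [a] by
        simp [PySem.Set.add, PySem.Set.contains, han]]
      simp [PySem.Set.contains, List.mem_append, hiff, or_comm]

-- every permutation of a nonempty list is nonempty
theorem pv_perms_ne_nil (n : Nat) (ys : List String) (hys : ys ≠ []) :
    ∀ p ∈ pvPermsA n ys, p ≠ [] := by
  intro p hp
  cases ys with
  | nil => exact absurd rfl hys
  | cons y ys' =>
    cases n with
    | zero => simp [pvPermsA] at hp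
    | succ m =>
      simp only [pvPermsA, List.mem_flatMap, List.mem_map] at hp
      obtain ⟨i, _, q, _, rfl⟩ := hp
      simp

-- ' '.join of a cons with a nonempty rest is concatenation with a space
theorem pv_join_cons (w : String) (p : List String) (hp : p ≠ []) :
    PySem.Str.join " " (w :: p) = pvConcatSp w (PySem.Str.join " " p) := by
  cases p with
  | nil => exact absurd rfl hp
  | cons q rest =>
    simp only [PySem.Str.join, pvConcatSp, List.map]
    rw [PySem.Chars.join_cons_cons]
    congr 1
    simp

theorem pv_join_singleton (w : String) : PySem.Str.join " " [w] = w := by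
  simp only [PySem.Str.join, List.map, PySem.Chars.join_singleton, String.ofList_toList]

-- main lemma: the recursive string builder equals permutations-then-join
theorem pv_build_eq : ∀ (n : Nat) (xs : List String), xs.length ≤ n →
    pvBuildB n xs = (pvPermsA n xs).map (PySem.Str.join " ") := by
  intro n
  induction n with
  | zero =>
    intro xs h
    have : xs = [] := List.length_eq_zero_iff.mp (Nat.le_zero.mp h)
    subst this
    simp [pvBuildB, pvPermsA, PySem.Str.join, PySem.Chars.join_nil]
  | succ m ih =>
    intro xs h
    match xs with
    | [] =>
      simp [pvBuildB, pvPermsA, PySem.Str.join, PySem.Chars.join_nil]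
    | [w] =>
      simp [pvBuildB, pvPermsA, pvPermsA, List.range_succ, pv_join_singleton]
    | x :: y :: rest =>
      show (PySem.List.enumerate (x :: y :: rest)).flatMap _ = _
      rw [PySem.List.enumerate_eq_map_pyRange (x :: y :: rest) ""]
      rw [show PySem.List.len (x :: y :: rest) = ((x :: y :: rest).length : Int) from rfl]
      rw [PySem.List.pyRange_zero_natCast]
      rw [List.flatMap_map, List.flatMap_map]
      conv_rhs =>
        rw [show pvPermsA (m+1) (x :: y :: rest)
              = (List.range (x :: y :: rest).length).flatMap (fun i =>
                  (pvPermsA m ((x :: y :: rest).eraseIdx i)).map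
                    (fun p => (x :: y :: rest).getD i "" :: p)) from rfl]
        rw [List.map_flatMap]
      refine List.flatMap_congr ?_ --  pointwise on i ∈ range
      intro i hi
      have hilt : i < (x :: y :: rest).length := List.mem_range.mp hi
      have hslice : PySem.List.slice (x :: y :: rest) none (some (i : Int))
            ++ PySem.List.slice (x :: y :: rest) (some ((i : Int) + 1)) none
          = (x :: y :: rest).eraseIdx i := by
        rw [show ((i : Int) + 1) = ((i + 1 : Nat) : Int) by push_cast; ring]
        rw [PySem.List.slice_to_natCast, PySem.List.slice_from_natCast,
            List.eraseIdx_eq_take_drop_succ]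
      have hget : PySem.List.pyGetD (x :: y :: rest) (i : Int) "" = (x :: y :: rest).getD i "" :=
        PySem.List.pyGetD_natCast _ _ _
      have hel : ((x :: y :: rest).eraseIdx i).length = (x :: y :: rest).length - 1 := by
        rw [List.length_eraseIdx, if_pos hilt]
      have hlen : ((x :: y :: rest).eraseIdx i).length ≤ m := by
        simp only [List.length_cons] at hel h ⊢
        omega
      have hne : (x :: y :: rest).eraseIdx i ≠ [] := by
        refine List.ne_nil_of_length_pos ?_
        simp only [List.length_cons] at hel ⊢
        omega
      simp only [hslice, hget, ih _ hlen, List.map_map]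
      refine List.map_congr_left ?_
      intro p hp
      have hpne : p ≠ [] := pv_perms_ne_nil m _ hne p hp
      exact (pv_join_cons _ p hpne).symm

-- ===== VERDICT (by name: the statement is the Claim_ definition above) =====
theorem slogan_maker_spec : Claim_equal_slogan_maker := by
  intro array _
  show slogan_maker array = slogan_maker_alt array
  unfold slogan_maker slogan_maker_alt
  dsimp only []
  rw [pv_dedup_eq array PySem.Set.empty [] (by intro w; simp [PySem.Set.contains, PySem.Set.empty])]
  rw [pv_foldl_join, List.nil_append, pv_build_eq _ _ (le_refl _)]
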